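-- pv_equiv track=rewrite | github.com/zhangdailin/NVIDIA_NETWORK_HEALTH_CHECK_PLATFORM | backend/services/cable_service.py | _decode_speed
-- ===== SOURCE A (Python) =====
-- SPEED_PRIORITY = [
--     (0x800, ("HDR/NDR", 7)),
--     (0x400, ("EDR/HDR100", 6)),
--     (0x200, ("FDR10", 5)),
--     (0x100, ("FDR", 4)),
--     (0x80, ("QDR", 3)),
--     (0x40, ("DDR", 2)),
--     (0x20, ("SDR+", 1)),
--     (0x10, ("SDR", 1)),
--     (0x8, ("Legacy", 0)),
--     (0x4, ("Legacy", 0)),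
--     (0x2, ("Legacy", 0)),
--     (0x1, ("Legacy", 0)),
-- ]
--
-- def _decode_speed(value):
--     try:
--         code = int(value)
--     except (TypeError, ValueError):
--         return (0, None)
--     for bit, (label, priority) in SPEED_PRIORITY:
--         if code & bit:
--             return (priority, label)
--     return (0, None)
-- ===== SOURCE B (Python) =====
-- _SPEED_BY_POS = [("Legacy", 0)] * 4 + [
--     ("SDR", 1), ("SDR+", 1), ("DDR", 2), ("QDR", 3),
--     ("FDR", 4), ("FDR10", 5), ("EDR/HDR100", 6), ("HDR/NDR", 7),
-- ]
--
-- def _decode_speed(value):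
--     try:
--         code = int(value)
--     except (TypeError, ValueError):
--         return (0, None)
--     masked = code & 0xFFF
--     if masked == 0:
--         return (0, None)
--     label, priority = _SPEED_BY_POS[masked.bit_length() - 1]
--     return (priority, label)
-- ===== Notes on version B (the rewrite author's own statement) =====
-- stated objective: idiomatic
-- what changed: Replaced the twelve-entry priority-list scan with a single mask (code & 0xFFF) and a direct highest-set-bit computation (bit_length) indexing a position-keyed table.
import Mathlib
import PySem

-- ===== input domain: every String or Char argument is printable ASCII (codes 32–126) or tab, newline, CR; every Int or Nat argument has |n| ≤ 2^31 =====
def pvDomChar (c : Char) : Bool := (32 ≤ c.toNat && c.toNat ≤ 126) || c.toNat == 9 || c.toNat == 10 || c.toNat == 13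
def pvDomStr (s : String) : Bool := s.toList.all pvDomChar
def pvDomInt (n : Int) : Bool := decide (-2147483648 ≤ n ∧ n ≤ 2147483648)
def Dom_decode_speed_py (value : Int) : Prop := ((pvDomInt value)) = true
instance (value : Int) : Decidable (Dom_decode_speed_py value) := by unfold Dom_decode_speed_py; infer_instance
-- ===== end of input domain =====

-- B replaces A's twelve-entry priority-list scan by one mask (code & 0xFFF) plus a direct
-- highest-set-bit (bit_length) index into a position-keyed table; objective: idiomatic.

-- ===== PORT A =====
def SPEED_PRIORITY : List (Int × (String × Int)) :=
  [(2048, ("HDR/NDR", 7)), (1024, ("EDR/HDR100", 6)), (512, ("FDR10", 5)),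
   (256, ("FDR", 4)), (128, ("QDR", 3)), (64, ("DDR", 2)), (32, ("SDR+", 1)),
   (16, ("SDR", 1)), (8, ("Legacy", 0)), (4, ("Legacy", 0)), (2, ("Legacy", 0)),
   (1, ("Legacy", 0))]

-- the for-loop over SPEED_PRIORITY; `int(value)` is the identity on an int (never raises)
def decode_speed_py_loop (code : Int) : List (Int × (String × Int)) → Int × Option String
  | [] => (0, none)
  | (bit, (label, priority)) :: rest =>
      if PySem.Int.band code bit ≠ 0 then (priority, some label)
      else decode_speed_py_loop code rest

def decode_speed_py (value : Int) : Int × Option String :=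
  decode_speed_py_loop value SPEED_PRIORITY

-- ===== PORT B =====
def SPEED_BY_POS : List (String × Int) :=
  [("Legacy", 0), ("Legacy", 0), ("Legacy", 0), ("Legacy", 0),
   ("SDR", 1), ("SDR+", 1), ("DDR", 2), ("QDR", 3),
   ("FDR", 4), ("FDR10", 5), ("EDR/HDR100", 6), ("HDR/NDR", 7)]

def decode_speed_py_alt (value : Int) : Int × Option String :=
  let masked := PySem.Int.band value 4095
  if masked = 0 then (0, none)
  else
    -- _SPEED_BY_POS[masked.bit_length() - 1]: the index is always in range (1 ≤ masked ≤ 4095)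
    let lp := PySem.List.pyGetD SPEED_BY_POS ((PySem.Int.bitLength masked : Int) - 1) ("Legacy", 0)
    (lp.2, some lp.1)

-- ===== PRECONDITION & SPEC =====
def Spec_decode_speed_py (value : Int) (out : Int × Option String) : Prop := out = decode_speed_py_alt value
instance (value : Int) (out : Int × Option String) : Decidable (Spec_decode_speed_py value out) := by unfold Spec_decode_speed_py; infer_instance

-- ===== CLAIM (what is proved, stated in full; the proofs are below) =====
def Claim_equal_decode_speed_py : Prop := ∀ (value : Int), Dom_decode_speed_py value → Spec_decode_speed_py value (decode_speed_py value)

-- ===== LEMMAS AND PROOFS =====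

-- the low 12 bits of value, as Python computes them with value & 0xFFF
def maskN (v : Int) : Nat := (PySem.Int.band v 4095).toNat

lemma band_eq_cast_maskN (v : Int) : PySem.Int.band v 4095 = ((maskN v : Nat) : Int) := by
  have h : 0 ≤ PySem.Int.band v 4095 := by
    rw [PySem.Int.band_comm]
    exact PySem.Int.band_nonneg_of_nonneg_left v (by norm_num)
  simp [maskN, Int.toNat_of_nonneg h]

lemma maskN_ofNat (n : Nat) : maskN ((n : Nat) : Int) = n % 4096 := by
  have hb : PySem.Int.band ((n : Nat) : Int) 4095 = ((n &&& 4095 : Nat) : Int) := by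
    exact_mod_cast PySem.Int.band_natCast n 4095
  have h : n &&& 4095 = n % 4096 := Nat.and_two_pow_sub_one_eq_mod n 12
  simp [maskN, hb, h]
  omega

lemma maskN_negSucc (w : Nat) : maskN (Int.negSucc w) = 4095 - w % 4096 := by
  have h : 4095 &&& w = w % 4096 := by
    rw [Nat.and_comm]; exact Nat.and_two_pow_sub_one_eq_mod w 12
  simp [maskN, PySem.Int.band, Int.negSucc_not_nonneg, h]

lemma maskN_lt (v : Int) : maskN v < 4096 := by
  rcases v with n | w
  · rw [Int.ofNat_eq_natCast, maskN_ofNat]; omega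
  · rw [maskN_negSucc]; omega

lemma bitcond (v : Int) (k : Nat) (hk : k < 12) :
    (PySem.Int.band v ((2 : Int) ^ k) ≠ 0) ↔ (maskN v).testBit k = true := by
  have h2 : ((2 : Int) ^ k) = (((2 ^ k : Nat) : Int)) := by push_cast; ring
  rcases v with n | w
  · rw [Int.ofNat_eq_natCast, h2, PySem.Int.band_natCast, maskN_ofNat,
      show (4096 : Nat) = 2 ^ 12 from rfl, Nat.testBit_mod_two_pow]
    have := Nat.and_two_pow n k
    rcases hb : n.testBit k <;> simp [hb, this, hk]
  · have hband : PySem.Int.band (Int.negSucc w) (((2 ^ k : Nat) : Int))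
        = ((2 ^ k - (2 ^ k &&& w) : Nat) : Int) := by
      have ht : ((2 : Int) ^ k).toNat = 2 ^ k := by
        rw [show ((2 : Int) ^ k) = ((2 ^ k : Nat) : Int) by push_cast; ring, Int.toNat_natCast]
      simp [PySem.Int.band, Int.negSucc_not_nonneg, ht]
    rw [h2, hband, maskN_negSucc]
    have hlt : w % 4096 < 2 ^ 12 := Nat.mod_lt _ (by norm_num)
    have hx : (4095 - w % 4096).testBit k = (decide (k < 12) && !(w % 4096).testBit k) := by
      have hsub : 4095 - w % 4096 = 2 ^ 12 - (w % 4096 + 1) := by omega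
      rw [hsub]; exact Nat.testBit_two_pow_sub_succ hlt k
    rw [hx, show (4096 : Nat) = 2 ^ 12 from rfl, Nat.testBit_mod_two_pow]
    have hand : 2 ^ k &&& w = (w.testBit k).toNat * 2 ^ k := by
      rw [Nat.and_comm]; exact Nat.and_two_pow w k
    have hpow : 0 < 2 ^ k := Nat.two_pow_pos k
    rcases hb : w.testBit k <;> simp [hb, hand, hk]

-- A's scan as a function of the 12-bit mask
def coreA (m : Nat) : Int × Option String :=
  if m.testBit 11 then (7, some "HDR/NDR")
  else if m.testBit 10 then (6, some "EDR/HDR100")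
  else if m.testBit 9 then (5, some "FDR10")
  else if m.testBit 8 then (4, some "FDR")
  else if m.testBit 7 then (3, some "QDR")
  else if m.testBit 6 then (2, some "DDR")
  else if m.testBit 5 then (1, some "SDR+")
  else if m.testBit 4 then (1, some "SDR")
  else if m.testBit 3 then (0, some "Legacy")
  else if m.testBit 2 then (0, some "Legacy")
  else if m.testBit 1 then (0, some "Legacy")
  else if m.testBit 0 then (0, some "Legacy")
  else (0, none)

lemma A_eq_coreA (v : Int) : decode_speed_py v = coreA (maskN v) := by
  have h11 : ¬PySem.Int.band v 2048 = 0 ↔ (maskN v).testBit 11 = true := by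
    simpa only [show ((2 : Int) ^ 11) = 2048 by norm_num, ne_eq] using bitcond v 11 (by norm_num)
  have h10 : ¬PySem.Int.band v 1024 = 0 ↔ (maskN v).testBit 10 = true := by
    simpa only [show ((2 : Int) ^ 10) = 1024 by norm_num, ne_eq] using bitcond v 10 (by norm_num)
  have h9 : ¬PySem.Int.band v 512 = 0 ↔ (maskN v).testBit 9 = true := by
    simpa only [show ((2 : Int) ^ 9) = 512 by norm_num, ne_eq] using bitcond v 9 (by norm_num)
  have h8 : ¬PySem.Int.band v 256 = 0 ↔ (maskN v).testBit 8 = true := by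
    simpa only [show ((2 : Int) ^ 8) = 256 by norm_num, ne_eq] using bitcond v 8 (by norm_num)
  have h7 : ¬PySem.Int.band v 128 = 0 ↔ (maskN v).testBit 7 = true := by
    simpa only [show ((2 : Int) ^ 7) = 128 by norm_num, ne_eq] using bitcond v 7 (by norm_num)
  have h6 : ¬PySem.Int.band v 64 = 0 ↔ (maskN v).testBit 6 = true := by
    simpa only [show ((2 : Int) ^ 6) = 64 by norm_num, ne_eq] using bitcond v 6 (by norm_num)
  have h5 : ¬PySem.Int.band v 32 = 0 ↔ (maskN v).testBit 5 = true := by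
    simpa only [show ((2 : Int) ^ 5) = 32 by norm_num, ne_eq] using bitcond v 5 (by norm_num)
  have h4 : ¬PySem.Int.band v 16 = 0 ↔ (maskN v).testBit 4 = true := by
    simpa only [show ((2 : Int) ^ 4) = 16 by norm_num, ne_eq] using bitcond v 4 (by norm_num)
  have h3 : ¬PySem.Int.band v 8 = 0 ↔ (maskN v).testBit 3 = true := by
    simpa only [show ((2 : Int) ^ 3) = 8 by norm_num, ne_eq] using bitcond v 3 (by norm_num)
  have h2 : ¬PySem.Int.band v 4 = 0 ↔ (maskN v).testBit 2 = true := by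
    simpa only [show ((2 : Int) ^ 2) = 4 by norm_num, ne_eq] using bitcond v 2 (by norm_num)
  have h1 : ¬PySem.Int.band v 2 = 0 ↔ (maskN v).testBit 1 = true := by
    simpa only [show ((2 : Int) ^ 1) = 2 by norm_num, ne_eq] using bitcond v 1 (by norm_num)
  have h0 : ¬PySem.Int.band v 1 = 0 ↔ (maskN v).testBit 0 = true := by
    simpa only [show ((2 : Int) ^ 0) = 1 by norm_num, ne_eq] using bitcond v 0 (by norm_num)
  simp only [decode_speed_py, SPEED_PRIORITY, decode_speed_py_loop, coreA,
    h11, h10, h9, h8, h7, h6, h5, h4, h3, h2, h1, h0]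

-- B as a function of the 12-bit mask
def coreB (m : Nat) : Int × Option String :=
  if (m : Int) = 0 then (0, none)
  else
    let lp := PySem.List.pyGetD SPEED_BY_POS ((PySem.Int.bitLength (m : Int) : Int) - 1) ("Legacy", 0)
    (lp.2, some lp.1)

lemma B_eq_coreB (v : Int) : decode_speed_py_alt v = coreB (maskN v) := by
  simp only [decode_speed_py_alt, coreB, band_eq_cast_maskN]

lemma core_eq_split : ∀ a b : Fin 64, coreA (64 * a.val + b.val) = coreB (64 * a.val + b.val) := by
  decide

lemma core_eq (m : Nat) (hm : m < 4096) : coreA m = coreB m := by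
  have h := core_eq_split ⟨m / 64, by omega⟩ ⟨m % 64, by omega⟩
  rwa [show 64 * (m / 64) + m % 64 = m by omega] at h

-- ===== VERDICT (by name: the statement is the Claim_ definition above) =====
theorem decode_speed_py_spec : Claim_equal_decode_speed_py := by
  intro v _
  unfold Spec_decode_speed_py
  rw [A_eq_coreA, B_eq_coreB]
  exact core_eq (maskN v) (maskN_lt v)
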